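-- pv_equiv track=rewrite | github.com/isa43461/ADA | hw05/champion.py | solve
-- ===== SOURCE A (Python) =====
-- import operator
--
-- def solve(A,n):
-- 	aux = []
-- 	for i in range(1,n):
-- 		acum = A[i] - A[i-1]
-- 		aux.append(acum)
-- 	oc = dict()
-- 	for i in aux:
-- 		if(oc.get(i) != None):
-- 			oc[i] +=1
-- 		else:
-- 			oc[i] = 1
-- 	l = sorted(oc.items(), key=operator.itemgetter(1), reverse=True)
-- 	n = len(l); ans = 0
-- 	if(n > 1):
-- 		if(l[0][1] == l[1][1]):
-- 			ans = 0
-- 		else: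
-- 			ans = l[0][0]
-- 	elif(n == 1):
-- 		ans = l[0][0]
-- 	return ans
-- ===== SOURCE B (Python) =====
-- def solve(A, n):
--     oc = {}
--     for i in range(1, n):
--         d = A[i] - A[i-1]
--         oc[d] = oc.get(d, 0) + 1
--     best_key, best_cnt, unique = 0, 0, True
--     for k, c in oc.items():
--         if c > best_cnt:
--             best_key, best_cnt, unique = k, c, True
--         elif c == best_cnt:
--             unique = False
--     return best_key if unique and best_cnt > 0 else 0
-- ===== Notes on version B (the rewrite author's own statement) =====
-- stated objective: alternative
-- what changed: B drops the intermediate diff list and the sort of the frequency items: it counts differences directly into the dict and finds the answer with a single linear scan tracking the maximal count, its key and whether the maximum is unique (O(n) instead of O(n + k log k), though the shared O(n) counting loop dominates measured time).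
import Mathlib
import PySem

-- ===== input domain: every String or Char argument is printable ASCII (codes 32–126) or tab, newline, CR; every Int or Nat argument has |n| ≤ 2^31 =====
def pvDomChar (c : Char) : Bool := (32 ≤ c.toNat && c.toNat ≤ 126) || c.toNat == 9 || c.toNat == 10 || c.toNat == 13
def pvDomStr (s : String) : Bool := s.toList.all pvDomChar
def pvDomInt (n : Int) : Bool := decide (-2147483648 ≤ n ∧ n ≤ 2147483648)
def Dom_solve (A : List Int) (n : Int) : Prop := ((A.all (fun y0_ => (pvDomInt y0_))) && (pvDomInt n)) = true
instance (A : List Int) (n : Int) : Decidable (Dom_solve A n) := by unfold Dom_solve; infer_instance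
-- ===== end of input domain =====

-- B skips the intermediate diff list and the sort of the frequency items: one counting loop,
-- then a single linear scan tracking the maximal count, its key and whether it is unique.

-- ===== PORT A =====
-- aux = []; for i in range(1,n): aux.append(A[i] - A[i-1])
def solveAux (A : List Int) (n : Int) : List Int :=
  (PySem.List.pyRange 1 n 1).foldl
    (fun acc i => acc ++ [PySem.List.pyGetD A i 0 - PySem.List.pyGetD A (i-1) 0]) []

-- oc = dict(); for i in aux: if oc.get(i) != None: oc[i] += 1 else: oc[i] = 1
def solveCount (aux : List Int) : PySem.Dict Int Int :=
  aux.foldl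
    (fun d i => if d.get? i ≠ none then d.insert i (d.getD i 0 + 1) else d.insert i 1)
    PySem.Dict.empty

-- n = len(l); ans = 0; if n > 1: … elif n == 1: …
def solvePick (l : List (Int × Int)) : Int :=
  let m : Int := l.length
  if m > 1 then
    if (PySem.List.pyGetD l 0 (0, 0)).2 = (PySem.List.pyGetD l 1 (0, 0)).2 then 0
    else (PySem.List.pyGetD l 0 (0, 0)).1
  else if m = 1 then (PySem.List.pyGetD l 0 (0, 0)).1
  else 0

def solve (A : List Int) (n : Int) : Int :=
  solvePick (PySem.List.sorted (solveCount (solveAux A n)).items (fun p => p.2) true)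

-- ===== PORT B =====
-- oc = {}; for i in range(1,n): d = A[i]-A[i-1]; oc[d] = oc.get(d, 0) + 1
def altCounter (A : List Int) (n : Int) : PySem.Dict Int Int :=
  (PySem.List.pyRange 1 n 1).foldl
    (fun d i =>
      let dd := PySem.List.pyGetD A i 0 - PySem.List.pyGetD A (i-1) 0
      d.insert dd (d.getD dd 0 + 1))
    PySem.Dict.empty

-- state = (best_key, best_cnt, unique); one item of the scan
def altStep (s : Int × Int × Bool) (p : Int × Int) : Int × Int × Bool :=
  if s.2.1 < p.2 then (p.1, p.2, true)
  else if p.2 = s.2.1 then (s.1, s.2.1, false)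
  else s

def solve_alt (A : List Int) (n : Int) : Int :=
  let s := (altCounter A n).items.foldl altStep (0, 0, true)
  if s.2.2 && decide (0 < s.2.1) then s.1 else 0

-- ===== PRECONDITION & SPEC =====
-- exactly the inputs on which Python A returns: the loop touches A[1..n-1], so
-- n ≤ len(A) (or the loop is empty, n ≤ 1); otherwise A raises IndexError.
def Pre_solve (A : List Int) (n : Int) : Prop := n ≤ (A.length : Int) ∨ n ≤ 1
instance (A : List Int) (n : Int) : Decidable (Pre_solve A n) := by unfold Pre_solve; infer_instance
def pvWitness_solve : List Int × Int := ([3, 5, 7, 8], 4)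

def Spec_solve (A : List Int) (n : Int) (out : Int) : Prop := out = solve_alt A n
instance (A : List Int) (n : Int) (out : Int) : Decidable (Spec_solve A n out) := by unfold Spec_solve; infer_instance

-- ===== CLAIM (what is proved, stated in full; the proofs are below) =====
def Claim_equal_solve : Prop := ∀ (A : List Int) (n : Int), Dom_solve A n → Pre_solve A n → Spec_solve A n (solve A n)

-- ===== LEMMAS AND PROOFS =====

-- the list of consecutive differences both programs count
def pvDiffs (A : List Int) (n : Int) : List Int :=
  (PySem.List.pyRange 1 n 1).map (fun i => PySem.List.pyGetD A i 0 - PySem.List.pyGetD A (i-1) 0)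

lemma solveAux_eq_diffs (A : List Int) (n : Int) : solveAux A n = pvDiffs A n := by
  unfold solveAux pvDiffs
  simpa using PySem.List.foldl_append_singleton_eq_map
    (fun i => PySem.List.pyGetD A i 0 - PySem.List.pyGetD A (i-1) 0) (PySem.List.pyRange 1 n 1) []

lemma solveCount_eq_counter (aux : List Int) : solveCount aux = PySem.Dict.counter aux := by
  unfold solveCount
  rw [show (fun (d : PySem.Dict Int Int) i => if d.get? i ≠ none then d.insert i (d.getD i 0 + 1) else d.insert i 1)
      = (fun d i => d.insert i (d.getD i 0 + 1)) from funext fun d => funext fun i => by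
        by_cases h : d.get? i = none
        · simp [h, PySem.Dict.getD_of_get?_eq_none d (0:Int) h]
        · simp [h]]
  exact PySem.Dict.foldl_insert_getD_add_one_eq_counter aux

lemma altCounter_eq_counter (A : List Int) (n : Int) :
    altCounter A n = PySem.Dict.counter (pvDiffs A n) := by
  unfold altCounter pvDiffs
  rw [← PySem.Dict.foldl_insert_getD_add_one_eq_counter, List.foldl_map]

lemma counter_items_snd_pos (xs : List Int) :
    ∀ p ∈ (PySem.Dict.counter xs).items, (1 : Int) ≤ p.2 := by
  intro p hp
  rw [PySem.Dict.items_counter] at hp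
  obtain ⟨k, hk, rfl⟩ := List.mem_map.mp hp
  have hm : k ∈ xs := (PySem.Set.mem_ofList xs k).mp hk
  have h2 : 0 < xs.count k := List.count_pos_iff.mpr hm
  show (1:Int) ≤ (xs.count k : Int)
  exact_mod_cast h2

-- characterisation of B's scan, by induction from the right
lemma altFold_inv (L : List (Int × Int)) (h1 : ∀ p ∈ L, (1 : Int) ≤ p.2) :
    (∀ p ∈ L, p.2 ≤ (L.foldl altStep (0, 0, true)).2.1) ∧
    (L = [] → L.foldl altStep (0, 0, true) = (0, 0, true)) ∧
    (L ≠ [] → ∃ q ∈ L, q.2 = (L.foldl altStep (0, 0, true)).2.1 ∧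
        q.1 = (L.foldl altStep (0, 0, true)).1) ∧
    ((L.foldl altStep (0, 0, true)).2.2 =
      decide (L.countP (fun p => decide (p.2 = (L.foldl altStep (0, 0, true)).2.1)) ≤ 1)) := by
  induction L using List.reverseRecOn with
  | nil => simp
  | append_singleton L p ih =>
    have h1' : ∀ q ∈ L, (1 : Int) ≤ q.2 := fun q hq => h1 q (List.mem_append_left _ hq)
    have hp1 : (1 : Int) ≤ p.2 := h1 p (by simp)
    obtain ⟨iUB, iNil, iWit, iU⟩ := ih h1'
    set s := L.foldl altStep (0, 0, true) with hs
    have hfold : (L ++ [p]).foldl altStep (0, 0, true) = altStep s p := by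
      rw [List.foldl_append]; rfl
    rw [hfold]
    by_cases hlt : s.2.1 < p.2
    · -- new maximum
      have hstep : altStep s p = (p.1, p.2, true) := by simp [altStep, hlt]
      rw [hstep]
      have hz : L.countP (fun q => decide (q.2 = p.2)) = 0 := by
        rw [List.countP_eq_zero]
        intro q hq
        simp only [decide_eq_true_eq]
        exact fun h => absurd (h ▸ iUB q hq) (by omega)
      refine ⟨?_, by simp, fun _ => ⟨p, by simp, rfl, rfl⟩, ?_⟩
      · intro q hq
        rcases List.mem_append.mp hq with h | h
        · exact le_of_lt (lt_of_le_of_lt (iUB q h) hlt)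
        · simp at h; simp [h]
      · simp [List.countP_append, hz]
    · by_cases heq : p.2 = s.2.1
      · -- tie with current maximum
        have hstep : altStep s p = (s.1, s.2.1, false) := by simp [altStep, heq]
        rw [hstep]
        have hLne : L ≠ [] := by
          intro h
          have h0 := iNil h
          rw [h0] at heq
          simp at heq
          omega
        obtain ⟨q, hqL, hq2, hq1⟩ := iWit hLne
        have hpos : 0 < L.countP (fun r => decide (r.2 = s.2.1)) := by
          rw [List.countP_pos_iff]
          exact ⟨q, hqL, by simp [hq2]⟩
        refine ⟨?_, by simp, fun _ => ⟨q, List.mem_append_left _ hqL, hq2, hq1⟩, ?_⟩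
        · intro r hr
          rcases List.mem_append.mp hr with h | h
          · exact iUB r h
          · simp at h; simp [h]; omega
        · have h2 : 2 ≤ (L ++ [p]).countP (fun r => decide (r.2 = s.2.1)) := by
            rw [List.countP_append]
            have hone : [p].countP (fun r => decide (r.2 = s.2.1)) = 1 := by simp [heq]
            omega
          show false = decide ((L ++ [p]).countP (fun r => decide (r.2 = s.2.1)) ≤ 1)
          symm
          rw [decide_eq_false_iff_not]
          omega
      · -- strictly smaller
        have hstep : altStep s p = s := by simp [altStep, hlt, heq]
        rw [hstep]
        have hlt' : p.2 < s.2.1 := lt_of_le_of_ne (not_lt.mp hlt) heq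
        have hLne : L ≠ [] := by
          intro h
          have h0 := iNil h
          rw [h0] at hlt'
          simp at hlt'
          omega
        obtain ⟨q, hqL, hq2, hq1⟩ := iWit hLne
        refine ⟨?_, by simp [hLne], fun _ => ⟨q, List.mem_append_left _ hqL, hq2, hq1⟩, ?_⟩
        · intro r hr
          rcases List.mem_append.mp hr with h | h
          · exact iUB r h
          · simp at h; simp [h]; omega
        · show s.2.2 = decide ((L ++ [p]).countP (fun r => decide (r.2 = s.2.1)) ≤ 1)
          rw [List.countP_append]
          have hzero : [p].countP (fun r => decide (r.2 = s.2.1)) = 0 := by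
            simp only [List.countP_cons, List.countP_nil]
            simp [heq]
          rw [hzero]
          simpa using iU


lemma mem_eq_of_countP_le_one {α : Type} (P : α → Bool) (L : List α)
    (h : L.countP P ≤ 1) {a b : α} (ha : a ∈ L) (hb : b ∈ L)
    (hpa : P a = true) (hpb : P b = true) : a = b := by
  have ha' : a ∈ L.filter P := List.mem_filter.mpr ⟨ha, hpa⟩
  have hb' : b ∈ L.filter P := List.mem_filter.mpr ⟨hb, hpb⟩
  have hlen : (L.filter P).length ≤ 1 := by rw [← List.countP_eq_length_filter]; exact h
  match hf : L.filter P with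
  | [] => rw [hf] at ha'; simp at ha'
  | [x] => rw [hf] at ha' hb'; simp at ha' hb'; rw [ha', hb']
  | x :: y :: t => rw [hf] at hlen; simp at hlen


-- the core equivalence on an arbitrary items list with positive counts
lemma pick_eq_scan (L : List (Int × Int)) (h1 : ∀ p ∈ L, (1 : Int) ≤ p.2) :
    solvePick (PySem.List.sorted L (fun p => p.2) true) =
      (let s := L.foldl altStep (0, 0, true);
       if s.2.2 && decide (0 < s.2.1) then s.1 else 0) := by
  obtain ⟨iUB, iNil, iWit, iU⟩ := altFold_inv L h1
  set s := L.foldl altStep (0, 0, true) with hs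
  show solvePick (PySem.List.sorted L (fun p => p.2) true) = if s.2.2 && decide (0 < s.2.1) then s.1 else 0
  by_cases hL : L = []
  · subst hL
    rw [iNil rfl]
    have : PySem.List.sorted ([] : List (Int × Int)) (fun p => p.2) true = [] :=
      (PySem.List.sorted_eq_nil_iff _ _ _).mpr rfl
    rw [this]
    simp [solvePick]
  · obtain ⟨q, hqL, hq2, hq1⟩ := iWit hL
    have hbc1 : (1 : Int) ≤ s.2.1 := hq2 ▸ h1 q hqL
    have hdec : decide (0 < s.2.1) = true := by simp; omega
    rw [hdec, Bool.and_true]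
    have hne : PySem.List.sorted L (fun p => p.2) true ≠ [] := by
      simp only [ne_eq, PySem.List.sorted_eq_nil_iff]; exact hL
    set P : Int × Int → Bool := fun r => decide (r.2 = s.2.1) with hP
    have hperm := PySem.List.sorted_perm L (fun p => p.2) true
    have hcnt : (PySem.List.sorted L (fun p => p.2) true).countP P = L.countP P :=
      hperm.countP_eq P
    rcases hl : PySem.List.sorted L (fun p => p.2) true with _ | ⟨p, t⟩
    · exact absurd hl hne
    · have hpmax := PySem.List.key_head_sorted_rev_ge L (fun p => p.2) hl
      have hpL : p ∈ L := hperm.mem_iff.mp (by rw [hl]; exact List.mem_cons_self)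
      have hp2 : p.2 = s.2.1 := le_antisymm (iUB p hpL) (hq2 ▸ hpmax q hqL)
      rw [hl] at hcnt
      by_cases hu : s.2.2 = true
      · rw [hu, if_pos rfl]
        have hle : L.countP P ≤ 1 := by
          rw [hu] at iU
          exact decide_eq_true_eq.mp iU.symm
        have hpq : p = q := mem_eq_of_countP_le_one P L hle hpL hqL
          (by simp [hP, hp2]) (by simp [hP, hq2])
        rcases t with _ | ⟨r, t'⟩
        · simp [solvePick, pysem]
          rw [hpq, hq1]
        · have hr2 : p.2 ≠ r.2 := by
            intro hcontra
            have : 2 ≤ (p :: r :: t').countP P := by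
              simp only [List.countP_cons]
              have e1 : P p = true := by simp [hP, hp2]
              have e2 : P r = true := by simp [hP, ← hcontra, hp2]
              simp [e1, e2]
            omega
          simp only [solvePick, pysem]
          simp [hr2]
          rw [hpq, hq1]
      · have hfalse : s.2.2 = false := Bool.not_eq_true _ ▸ (by simpa using hu)
        rw [hfalse, if_neg (by simp)]
        have h2 : 2 ≤ L.countP P := by
          rw [hfalse] at iU
          have := decide_eq_false_iff_not.mp iU.symm
          omega
        rcases t with _ | ⟨r, t'⟩
        · -- countP of a singleton ≤ 1, contradiction
          exfalso
          have : (p :: ([] : List (Int × Int))).countP P ≤ 1 := by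
            simp only [List.countP_cons, List.countP_nil]
            split <;> omega
          omega
        · -- show p.2 = r.2, so A returns 0
          have hpair := PySem.List.sorted_pairwise_rev L (fun p => p.2)
          rw [hl] at hpair
          have hpr : r.2 ≤ p.2 := (List.pairwise_cons.mp hpair).1 r (by simp)
          have hex : ∃ x ∈ r :: t', P x = true := by
            by_contra hno
            push Not at hno
            have hz : (r :: t').countP P = 0 := List.countP_eq_zero.mpr (by
              intro x hx; simpa using hno x hx)
            have e1 : P p = true := by simp [hP, hp2]
            have hone : (p :: r :: t').countP P = 1 := by
              rw [List.countP_cons, hz, e1]; simp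
            omega
          obtain ⟨x, hx, hPx⟩ := hex
          have hx2 : x.2 = s.2.1 := by simpa [hP] using hPx
          have hxr : x.2 ≤ r.2 := by
            rcases List.mem_cons.mp hx with h | h
            · rw [h]
            · have hpair2 := (List.pairwise_cons.mp hpair).2
              exact (List.pairwise_cons.mp hpair2).1 x h
          have hr2 : p.2 = r.2 := by omega
          simp only [solvePick, pysem]
          simp [hr2]


-- ===== VERDICT (by name: the statement is the Claim_ definition above) =====
theorem solve_spec : Claim_equal_solve := by
  intro A n _ _
  unfold Spec_solve solve solve_alt
  rw [solveAux_eq_diffs, solveCount_eq_counter, altCounter_eq_counter]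
  exact pick_eq_scan _ (counter_items_snd_pos _)
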